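-- pv_equiv track=rewrite | github.com/adum/robotsrevenge | scripts/generate_levels_v4_evo.py | format_reject_counts
-- ===== SOURCE A (Python) =====
-- REJECT_CODE_ORDER = (
--     "pb",  # blueprint build failed
--     "mj",  # meaningless jump
--     "ct",  # trace failed
--     "ms",  # minimum steps not met
--     "js",  # jump/sense usage missing
--     "sb",  # missing S-branch split
--     "ux",  # low instruction usage / dead path
--     "dv",  # low solution direction diversity
--     "sp",  # route spread too low
--     "vc",  # visited cells too low
--     "dn",  # density/open ratio infeasible
--     "ne",  # hidden solution did not escape
--     "sr",  # straight-run limit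
--     "tc",  # turn-cancel pattern
--     "pl",  # easy short program exists
--     "np",  # no movement-only path
--     "md",  # min direction types to exit not met
-- )
--
-- def format_reject_counts(reject_counts: dict[str, int]) -> str:
--     if not reject_counts:
--         return "-"
--     parts: list[str] = []
--     seen: set[str] = set()
--     for code in REJECT_CODE_ORDER:
--         count = reject_counts.get(code, 0)
--         if count <= 0:
--             continue
--         parts.append(f"{code}={count}")
--         seen.add(code)
--     for code in sorted(reject_counts):
--         if code in seen:
--             continue
--         count = reject_counts[code]
--         if count <= 0:
--             continue
--         parts.append(f"{code}={count}")
--     return " ".join(parts) if parts else "-"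
-- ===== SOURCE B (Python) =====
-- REJECT_CODE_ORDER = (
--     "pb", "mj", "ct", "ms", "js", "sb", "ux", "dv", "sp", "vc",
--     "dn", "ne", "sr", "tc", "pl", "np", "md",
-- )
--
--
-- def format_reject_counts(reject_counts: dict[str, int]) -> str:
--     if not reject_counts:
--         return "-"
--     rank = {code: i for i, code in enumerate(REJECT_CODE_ORDER)}
--     n = len(REJECT_CODE_ORDER)
--     order = sorted(reject_counts, key=lambda c: (rank.get(c, n), c))
--     parts = [f"{c}={reject_counts[c]}" for c in order if reject_counts[c] > 0]
--     return " ".join(parts) if parts else "-"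
-- ===== Notes on version B (the rewrite author's own statement) =====
-- stated objective: simpler
-- what changed: Replaces A's two partitioned passes (fixed-order scan building a seen-set, then an alphabetical pass skipping seen codes) by building a rank index once and emitting all keys in a single sorted pass keyed by (rank, code).
import Mathlib
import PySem

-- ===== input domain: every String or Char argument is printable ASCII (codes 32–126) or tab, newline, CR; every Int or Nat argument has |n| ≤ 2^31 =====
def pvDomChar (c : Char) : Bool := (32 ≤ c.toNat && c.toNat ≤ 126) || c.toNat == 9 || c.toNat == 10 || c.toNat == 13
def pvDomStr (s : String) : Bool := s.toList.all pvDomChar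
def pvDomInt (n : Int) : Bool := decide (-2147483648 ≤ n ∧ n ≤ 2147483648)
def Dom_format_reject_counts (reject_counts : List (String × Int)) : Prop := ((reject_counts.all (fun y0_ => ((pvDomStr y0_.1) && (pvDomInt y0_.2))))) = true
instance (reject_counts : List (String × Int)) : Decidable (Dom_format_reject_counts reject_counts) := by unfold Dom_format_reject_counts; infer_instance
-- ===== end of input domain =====

-- B replaces A's two partitioned passes (fixed-order scan with a seen-set, then an
-- alphabetical pass over the remaining keys) by a rank index built once plus a single
-- sorted pass keyed by (rank, code); objective: simpler.

-- module constant used by both versions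
def REJECT_CODE_ORDER : List String :=
  ["pb", "mj", "ct", "ms", "js", "sb", "ux", "dv", "sp", "vc",
   "dn", "ne", "sr", "tc", "pl", "np", "md"]

-- ===== PORT A =====
-- 'reject_counts[code]' in A's second loop is ported as getD: the key is always present
-- there (the loop runs over sorted dict keys), so getD equals the Python subscript.
def format_reject_counts (reject_counts : List (String × Int)) : String :=
  let d := PySem.Dict.ofList reject_counts
  if d.items = [] then "-"
  else
    let ps : List String × PySem.Set String :=
      REJECT_CODE_ORDER.foldl (fun acc code =>
        let count := d.getD code 0
        if count ≤ 0 then acc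
        else (acc.1 ++ [code ++ "=" ++ PySem.Int.toStr count], PySem.Set.add acc.2 code))
        ([], PySem.Set.empty)
    let parts := (PySem.List.sorted d.keys (fun c => c) false).foldl (fun parts code =>
        if PySem.Set.contains ps.2 code then parts
        else
          let count := d.getD code 0
          if count ≤ 0 then parts
          else parts ++ [code ++ "=" ++ PySem.Int.toStr count]) ps.1
    if parts = [] then "-" else PySem.Str.join " " parts

-- ===== PORT B =====
-- the comprehension '[f"{c}={reject_counts[c]}" for c in order if reject_counts[c] > 0]'
-- is filter-then-map; 'reject_counts[c]' is getD (c is a dict key).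
def format_reject_counts_alt (reject_counts : List (String × Int)) : String :=
  let d := PySem.Dict.ofList reject_counts
  if d.items = [] then "-"
  else
    let rank := (PySem.List.enumerate REJECT_CODE_ORDER 0).foldl
        (fun r p => r.insert p.2 p.1) PySem.Dict.empty
    let n : Int := (REJECT_CODE_ORDER.length : Int)
    let order := PySem.List.sorted2 d.keys (fun c => rank.getD c n) (fun c => c) false
    let parts := (order.filter (fun c => decide (0 < d.getD c 0))).map
        (fun c => c ++ "=" ++ PySem.Int.toStr (d.getD c 0))
    if parts = [] then "-" else PySem.Str.join " " parts

-- ===== PRECONDITION & SPEC =====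
def Spec_format_reject_counts (reject_counts : List (String × Int)) (out : String) : Prop := out = format_reject_counts_alt reject_counts
instance (reject_counts : List (String × Int)) (out : String) : Decidable (Spec_format_reject_counts reject_counts out) := by unfold Spec_format_reject_counts; infer_instance

-- ===== CLAIM (what is proved, stated in full; the proofs are below) =====
def Claim_equal_format_reject_counts : Prop := ∀ (reject_counts : List (String × Int)), Dom_format_reject_counts reject_counts → Spec_format_reject_counts reject_counts (format_reject_counts reject_counts)

-- ===== LEMMAS AND PROOFS =====

-- B's rank dictionary, as a closed term
def pvRank : PySem.Dict String Int :=
  (PySem.List.enumerate REJECT_CODE_ORDER 0).foldl (fun r p => r.insert p.2 p.1) PySem.Dict.empty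

-- the shared emit condition ('count > 0') and entry format of both programs
def pvOk (d : PySem.Dict String Int) (c : String) : Bool := !decide (d.getD c 0 ≤ 0)
def pvFmt (d : PySem.Dict String Int) (c : String) : String := c ++ "=" ++ PySem.Int.toStr (d.getD c 0)

lemma rank_keys : pvRank.keys = REJECT_CODE_ORDER := by decide

lemma rankD_lt_of_mem {c : String} (h : c ∈ REJECT_CODE_ORDER) : pvRank.getD c 17 < 17 := by
  have hall : REJECT_CODE_ORDER.all (fun c => decide (pvRank.getD c 17 < 17)) = true := by decide
  have := List.all_eq_true.mp hall c h
  simpa using this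

lemma rankD_eq_of_not_mem {c : String} (h : c ∉ REJECT_CODE_ORDER) : pvRank.getD c 17 = 17 := by
  apply PySem.Dict.getD_of_not_contains
  rw [PySem.Dict.contains_eq_decide_mem_keys, rank_keys]
  simpa using h

lemma order_pairwise_rank :
    REJECT_CODE_ORDER.Pairwise (fun a b => pvRank.getD a 17 < pvRank.getD b 17) := by decide

lemma ord_nodup : REJECT_CODE_ORDER.Nodup := by decide

-- A's first loop: parts emitted for the known codes with positive count, plus the seen-set
lemma loopA (d : PySem.Dict String Int) (L : List String) (p : List String) (s : PySem.Set String) :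
    L.foldl (fun acc code =>
      if d.getD code 0 ≤ 0 then acc
      else (acc.1 ++ [code ++ "=" ++ PySem.Int.toStr (d.getD code 0)], PySem.Set.add acc.2 code)) (p, s)
    = (p ++ (L.filter (pvOk d)).map (pvFmt d), s.update (L.filter (pvOk d))) := by
  induction L generalizing p s with
  | nil => simp [PySem.Set.update_nil]
  | cons c L ih =>
    by_cases h : d.getD c 0 ≤ 0 <;>
      simp [h, pvOk, pvFmt, ih, PySem.Set.update_cons]

-- A's second loop: parts appended for the unseen keys with positive count
lemma loopA2 (d : PySem.Dict String Int) (seen : PySem.Set String) (L : List String) (p : List String) :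
    L.foldl (fun parts code =>
      if PySem.Set.contains seen code then parts
      else
        if d.getD code 0 ≤ 0 then parts
        else parts ++ [code ++ "=" ++ PySem.Int.toStr (d.getD code 0)]) p
    = p ++ (L.filter (fun c => !PySem.Set.contains seen c && pvOk d c)).map (pvFmt d) := by
  induction L generalizing p with
  | nil => simp
  | cons c L ih =>
    rw [List.foldl_cons, ih]
    by_cases hs : c ∈ seen
    · simp [hs]
    · by_cases h : d.getD c 0 ≤ 0 <;>
        simp [hs, h, pvOk, pvFmt]

-- B's tuple-keyed sort is the sort by the lexicographic product key
lemma sorted2_eq_sorted_lex (xs : List String) (k1 : String → Int) :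
    PySem.List.sorted2 xs k1 (fun c => c) false
      = PySem.List.sorted xs (fun c => toLex (k1 c, c)) := by
  rw [PySem.List.sorted_eq_foldl_insertBy]
  show xs.foldl _ [] = _
  have h : (fun a b => decide (k1 a < k1 b) || (!decide (k1 b < k1 a) && decide (a < b)))
      = (fun a b : String => decide (toLex (k1 a, a) < toLex (k1 b, b))) := by
    funext a b
    rcases lt_trichotomy (k1 a) (k1 b) with h1 | h1 | h1
    · simp [Prod.Lex.lt_iff, h1, not_lt.mpr (le_of_lt h1)]
    · simp [Prod.Lex.lt_iff, h1]
    · simp [Prod.Lex.lt_iff, h1, not_lt.mpr (le_of_lt h1), ne_of_gt h1]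
  simp only [h, Bool.false_eq_true, if_false]

-- the heart: B's single sorted pass lists the known keys in REJECT_CODE_ORDER order,
-- then the unknown keys alphabetically
lemma sorted2_keys_eq (ks : List String) (hnd : ks.Nodup) :
    PySem.List.sorted2 ks (fun c => pvRank.getD c 17) (fun c => c) false
    = REJECT_CODE_ORDER.filter (fun c => decide (c ∈ ks))
      ++ (PySem.List.sorted ks (fun c => c)).filter (fun c => !decide (c ∈ REJECT_CODE_ORDER)) := by
  rw [sorted2_eq_sorted_lex]
  apply PySem.List.sorted_eq_of_perm_of_pairwise_lt
  · -- the right-hand side is a permutation of ks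
    have nd2 : (REJECT_CODE_ORDER.filter (fun c => decide (c ∈ ks))).Nodup := ord_nodup.filter _
    have h1 : (REJECT_CODE_ORDER.filter (fun c => decide (c ∈ ks))).Perm
        (ks.filter (fun c => decide (c ∈ REJECT_CODE_ORDER))) := by
      rw [List.perm_ext_iff_of_nodup nd2 (hnd.filter _)]
      intro a; simp [List.mem_filter, and_comm]
    have h2 : ((PySem.List.sorted ks (fun c => c)).filter (fun c => !decide (c ∈ REJECT_CODE_ORDER))).Perm
        (ks.filter (fun c => !decide (c ∈ REJECT_CODE_ORDER))) :=
      List.Perm.filter _ (PySem.List.sorted_perm ks (fun c => c) false)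
    exact (h1.append h2).trans (List.filter_append_perm _ ks)
  · -- and is strictly increasing under the lexicographic (rank, code) key
    rw [List.pairwise_append]
    refine ⟨?_, ?_, ?_⟩
    · have := List.Pairwise.sublist
        (List.filter_sublist (p := fun c => decide (c ∈ ks)) (l := REJECT_CODE_ORDER))
        order_pairwise_rank
      exact this.imp (fun h => Prod.Lex.lt_iff.mpr (Or.inl h))
    · have hs : (PySem.List.sorted ks (fun c => c)).Pairwise (· ≤ ·) := by
        simpa using PySem.List.sorted_pairwise ks (fun c => c)
      have hn : (PySem.List.sorted ks (fun c => c)).Nodup :=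
        ((PySem.List.sorted_perm ks (fun c => c) false).nodup_iff).mpr hnd
      have hlt : (PySem.List.sorted ks (fun c => c)).Pairwise (· < ·) :=
        (hs.and hn).imp (fun ⟨hle, hne⟩ => lt_of_le_of_ne hle hne)
      have hpw : ((PySem.List.sorted ks (fun c => c)).filter
          (fun c => !decide (c ∈ REJECT_CODE_ORDER))).Pairwise (· < ·) :=
        List.Pairwise.sublist List.filter_sublist hlt
      refine List.Pairwise.imp_of_mem ?_ hpw
      intro a b ha hb hab
      have ha' : a ∉ REJECT_CODE_ORDER := by simpa using (List.mem_filter.mp ha).2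
      have hb' : b ∉ REJECT_CODE_ORDER := by simpa using (List.mem_filter.mp hb).2
      exact Prod.Lex.lt_iff.mpr
        (Or.inr ⟨by simp [rankD_eq_of_not_mem ha', rankD_eq_of_not_mem hb'], hab⟩)
    · intro a ha b hb
      have ha' : a ∈ REJECT_CODE_ORDER := (List.mem_filter.mp ha).1
      have hb' : b ∉ REJECT_CODE_ORDER := by simpa using (List.mem_filter.mp hb).2
      exact Prod.Lex.lt_iff.mpr
        (Or.inl (by simp [rankD_eq_of_not_mem hb']; exact rankD_lt_of_mem ha'))

lemma mem_keys_of_ok (d : PySem.Dict String Int) (c : String) (h : pvOk d c = true) : c ∈ d.keys := by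
  by_contra hc
  have h2 : d.contains c = false := by
    rw [PySem.Dict.contains_eq_decide_mem_keys]; simpa using hc
  have h3 := PySem.Dict.getD_of_not_contains d (k := c) 0 h2
  simp [pvOk, h3] at h

lemma okb_eq (d : PySem.Dict String Int) : (fun c => decide (0 < d.getD c 0)) = pvOk d := by
  funext c
  by_cases h : d.getD c 0 ≤ 0
  · simp [pvOk, h, not_lt.mpr h]
  · simp [pvOk, h, not_le.mp h]

-- on the known-code segment the positivity filter already forces membership in the keys
lemma E1 (d : PySem.Dict String Int) :
    (REJECT_CODE_ORDER.filter (fun c => decide (c ∈ d.keys))).filter (pvOk d)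
      = REJECT_CODE_ORDER.filter (pvOk d) := by
  rw [List.filter_filter]
  apply List.filter_congr
  intro c _
  by_cases h : pvOk d c
  · simp [h, mem_keys_of_ok d c h]
  · simp [h]

-- A's 'not in seen' test agrees with B's 'not a known code' test under the positivity filter
lemma E2 (d : PySem.Dict String Int) (L : List String) :
    L.filter (fun c => !PySem.Set.contains (PySem.Set.ofList (REJECT_CODE_ORDER.filter (pvOk d))) c && pvOk d c)
    = (L.filter (fun c => !decide (c ∈ REJECT_CODE_ORDER))).filter (pvOk d) := by
  rw [List.filter_filter]
  apply List.filter_congr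
  intro c _
  by_cases h : pvOk d c
  · have hmem : c ∈ PySem.Set.ofList (REJECT_CODE_ORDER.filter (pvOk d)) ↔ c ∈ REJECT_CODE_ORDER := by
      simp [PySem.Set.mem_ofList, List.mem_filter, h]
    by_cases hm : c ∈ REJECT_CODE_ORDER <;> simp [h, hm, hmem]
  · simp [h]

lemma ports_agree (rc : List (String × Int)) :
    format_reject_counts rc = format_reject_counts_alt rc := by
  have hnd : (PySem.Dict.ofList (κ := String) (ν := Int) rc).keys.Nodup :=
    PySem.Dict.nodup_keys_ofList rc
  simp only [format_reject_counts, format_reject_counts_alt]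
  by_cases he : (PySem.Dict.ofList (κ := String) (ν := Int) rc).items = []
  · simp [he]
  · rw [if_neg he, if_neg he]
    have hn : ((REJECT_CODE_ORDER.length : Nat) : Int) = 17 := by norm_num [REJECT_CODE_ORDER]
    have hr : List.foldl (fun (r : PySem.Dict String Int) (p : Int × String) => r.insert p.2 p.1)
        PySem.Dict.empty (PySem.List.enumerate REJECT_CODE_ORDER) = pvRank := rfl
    have hfmt : (fun c => c ++ "=" ++ PySem.Int.toStr ((PySem.Dict.ofList rc).getD c 0))
        = pvFmt (PySem.Dict.ofList rc) := rfl
    simp only [loopA, loopA2, PySem.Set.update_empty, List.nil_append, hn, hr, hfmt, okb_eq,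
      sorted2_keys_eq _ hnd, List.filter_append, List.map_append, E1, E2]

-- ===== VERDICT (by name: the statement is the Claim_ definition above) =====
theorem format_reject_counts_spec : Claim_equal_format_reject_counts := by
  intro rc _
  unfold Spec_format_reject_counts
  exact ports_agree rc
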